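-- pv_equiv track=rewrite | github.com/MrWhiteres/test_work | parcing.py | return_new_data_list
-- ===== SOURCE A (Python) =====
-- def return_new_data_list(check_list: list, data_list: list) -> list:
--     """Return sorted data list"""
--     result = list()
--     for i in check_list:
--         for element in data_list:
--             for key, value in element.items():
--                 if value == i:
--                     result.append({key: value})
--     return result
-- ===== SOURCE B (Python) =====
-- def return_new_data_list(check_list: list, data_list: list) -> list:
--     """Return sorted data list"""
--     pairs = [(value, {key: value}) for element in data_list
--              for key, value in element.items()]
--     index = {}
--     for value, single in pairs:
--         index.setdefault(value, []).append(single)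
--     return [single for i in check_list for single in index.get(i, [])]
-- ===== Notes on version B (the rewrite author's own statement) =====
-- stated objective: faster
-- what changed: B flattens data_list once into (value, {key: value}) pairs, groups them into a value->matches index in one pass, and emits the answer as a flat lookup comprehension over check_list, instead of A's rescan of every dict entry for every check item.
import Mathlib
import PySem

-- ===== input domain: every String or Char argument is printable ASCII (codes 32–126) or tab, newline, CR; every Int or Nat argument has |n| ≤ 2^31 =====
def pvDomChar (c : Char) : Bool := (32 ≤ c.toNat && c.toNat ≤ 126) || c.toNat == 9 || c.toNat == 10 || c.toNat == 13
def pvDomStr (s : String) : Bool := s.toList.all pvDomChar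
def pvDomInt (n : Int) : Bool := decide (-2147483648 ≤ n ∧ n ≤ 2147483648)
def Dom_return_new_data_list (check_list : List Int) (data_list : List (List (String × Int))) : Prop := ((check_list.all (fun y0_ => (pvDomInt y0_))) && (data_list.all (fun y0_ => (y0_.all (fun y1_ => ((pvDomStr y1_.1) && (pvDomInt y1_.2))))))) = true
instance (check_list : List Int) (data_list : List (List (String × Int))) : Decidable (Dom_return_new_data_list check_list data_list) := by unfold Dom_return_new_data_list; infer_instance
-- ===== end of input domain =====

-- B flattens data_list into (value, singleton) pairs once, groups them into a value→matches index, and answers check_list by lookups (objective: faster).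

-- ===== PORT A =====
-- literal port of A: for i in check_list: for element in data_list: for key, value in element.items(): if value == i: result.append({key: value})
def return_new_data_list (check_list : List Int) (data_list : List (List (String × Int))) : List (List (String × Int)) :=
  check_list.foldl (fun result i =>
    data_list.foldl (fun result element =>
      (PySem.Dict.ofList element).items.foldl (fun result kv =>
        if kv.2 == i then result ++ [[(kv.1, kv.2)]] else result) result) result) []

-- ===== PORT B =====
-- literal port of Source B: pairs comprehension, setdefault-append grouping loop, lookup comprehension
def return_new_data_list_alt (check_list : List Int) (data_list : List (List (String × Int))) : List (List (String × Int)) :=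
  let pairs : List (Int × List (String × Int)) :=
    data_list.flatMap (fun element =>
      (PySem.Dict.ofList element).items.map (fun kv => (kv.2, [(kv.1, kv.2)])))
  let index : PySem.Dict Int (List (List (String × Int))) :=
    pairs.foldl (fun d p => d.modify p.1 [] (· ++ [p.2])) PySem.Dict.empty
  check_list.flatMap (fun i => index.getD i [])

-- ===== PRECONDITION & SPEC =====
def Spec_return_new_data_list (check_list : List Int) (data_list : List (List (String × Int))) (out : List (List (String × Int))) : Prop := out = return_new_data_list_alt check_list data_list
instance (check_list : List Int) (data_list : List (List (String × Int))) (out : List (List (String × Int))) : Decidable (Spec_return_new_data_list check_list data_list out) := by unfold Spec_return_new_data_list; infer_instance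

-- ===== CLAIM (what is proved, stated in full; the proofs are below) =====
def Claim_equal_return_new_data_list : Prop := ∀ (check_list : List Int) (data_list : List (List (String × Int))), Dom_return_new_data_list check_list data_list → Spec_return_new_data_list check_list data_list (return_new_data_list check_list data_list)

-- ===== LEMMAS AND PROOFS =====

-- all {key:value} singleton dicts whose value is i, in data_list order
def pvScan (data_list : List (List (String × Int))) (i : Int) : List (List (String × Int)) :=
  data_list.flatMap (fun element =>
    ((PySem.Dict.ofList element).items.filter (fun kv => kv.2 == i)).map (fun kv => [(kv.1, kv.2)]))

theorem pvA_middle (i : Int) (dl : List (List (String × Int))) (res : List (List (String × Int))) :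
    dl.foldl (fun result element =>
      (PySem.Dict.ofList element).items.foldl (fun result kv =>
        if kv.2 == i then result ++ [[(kv.1, kv.2)]] else result) result) res
    = res ++ pvScan dl i := by
  simp only [PySem.List.foldl_append_if, PySem.List.foldl_append_eq_flatMap, pvScan]

theorem pvA_eq (cl : List Int) (dl : List (List (String × Int))) :
    return_new_data_list cl dl = cl.flatMap (pvScan dl) := by
  unfold return_new_data_list
  have h : (fun (result : List (List (String × Int))) (i : Int) =>
      dl.foldl (fun result element =>
        (PySem.Dict.ofList element).items.foldl (fun result kv =>
          if kv.2 == i then result ++ [[(kv.1, kv.2)]] else result) result) result)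
      = fun result i => result ++ pvScan dl i := by
    funext res i; exact pvA_middle i dl res
  rw [h, PySem.List.foldl_append_eq_flatMap]
  simp

-- grouping a flat pair list: getD i reads off the second components of the pairs tagged i, in order
theorem pvB_group (i : Int) (ps : List (Int × List (String × Int)))
    (d : PySem.Dict Int (List (List (String × Int)))) :
    (ps.foldl (fun d p => d.modify p.1 [] (· ++ [p.2])) d).getD i []
    = d.getD i [] ++ (ps.filter (fun p => p.1 == i)).map (fun p => p.2) := by
  induction ps generalizing d with
  | nil => simp
  | cons p tl ih =>
    simp only [List.foldl_cons, ih, List.filter_cons]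
    by_cases h : i = p.1
    · simp [h]
    · have h' : p.1 ≠ i := fun he => h he.symm
      simp [PySem.Dict.getD_modify, h, h']

theorem pvB_eq (cl : List Int) (dl : List (List (String × Int))) :
    return_new_data_list_alt cl dl = cl.flatMap (pvScan dl) := by
  unfold return_new_data_list_alt
  have h : ∀ i : Int,
      ((dl.flatMap (fun element =>
        (PySem.Dict.ofList element).items.map (fun kv => (kv.2, [(kv.1, kv.2)])))).foldl
          (fun d p => d.modify p.1 [] (· ++ [p.2])) PySem.Dict.empty).getD i []
      = pvScan dl i := by
    intro i
    rw [pvB_group]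
    simp [pvScan, List.filter_flatMap, List.map_flatMap, List.filter_map, List.map_map, Function.comp_def]
  simp only [h]

-- ===== VERDICT (by name: the statement is the Claim_ definition above) =====
theorem return_new_data_list_spec : Claim_equal_return_new_data_list := by
  intro cl dl _
  unfold Spec_return_new_data_list
  rw [pvA_eq, pvB_eq]
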